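-- pv_equiv track=rewrite | github.com/harsimran-s20/python-assignment | code/question-one/chipher.py | brute_force_decrypt
-- ===== SOURCE A (Python) =====
-- from typing import List, Tuple
--
-- def is_lower(c: str) -> bool:
--     return 'a' <= c <= 'z'
--
-- def is_upper(c: str) -> bool:
--     return 'A' <= c <= 'Z'
--
-- def shift_char(c: str, shift: int) -> str:
--     """Shift ASCII letter c by `shift` positions with wrap-around. Non-letters returned unchanged."""
--     if is_lower(c):
--         base = ord('a')
--         return chr((ord(c) - base + shift) % 26 + base)
--     if is_upper(c):
--         base = ord('A')
--         return chr((ord(c) - base + shift) % 26 + base)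
--     return c
--
-- def classify_plain(c: str) -> str:
--     if is_lower(c):
--         return "L1" if 'a' <= c <= 'm' else "L2"
--     if is_upper(c):
--         return "U1" if 'A' <= c <= 'M' else "U2"
--     return "O"
--
-- def brute_force_decrypt(enc_text: str, shift1: int, shift2: int) -> Tuple[List[str], List[Tuple[int, str, List[str]]]]:
--     """
--     For each alphabetic position try all plaintext letters and see which map to this ciphertext char.
--     If exactly one plaintext maps -> use it. If multiple map -> record ambiguity and pick first deterministically.
--     """
--     s1 = shift1 % 26
--     s2 = shift2 % 26
--     decrypted: List[str] = []
--     ambiguities: List[Tuple[int, str, List[str]]] = []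
--
--     lower_alphabet = [chr(i) for i in range(ord('a'), ord('z') + 1)]
--     upper_alphabet = [chr(i) for i in range(ord('A'), ord('Z') + 1)]
--
--     for i, c in enumerate(enc_text):
--         if is_lower(c):
--             candidates = []
--             for p in lower_alphabet:
--                 # encrypting p to see if it equals c
--                 code = classify_plain(p)
--                 if code == "L1":
--                     e = shift_char(p, (s1 * s2) % 26)
--                 else:
--                     # L2
--                     e = shift_char(p, -((s1 + s2) % 26))
--                 if e == c:
--                     candidates.append(p)
--             if len(candidates) == 1:
--                 decrypted.append(candidates[0])
--             else:
--                 decrypted.append(candidates[0] if candidates else c)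
--                 ambiguities.append((i, c, candidates))
--         elif is_upper(c):
--             candidates = []
--             for p in upper_alphabet:
--                 code = classify_plain(p)
--                 if code == "U1":
--                     e = shift_char(p, -s1)
--                 else:
--                     # U2
--                     e = shift_char(p, (s2 * s2) % 26)
--                 if e == c:
--                     candidates.append(p)
--             if len(candidates) == 1:
--                 decrypted.append(candidates[0])
--             else:
--                 decrypted.append(candidates[0] if candidates else c)
--                 ambiguities.append((i, c, candidates))
--         else:
--             decrypted.append(c)
--
--     return decrypted, ambiguities
-- ===== SOURCE B (Python) =====
-- def _candidates(ci, a1, a2, base):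
--     """Invert the two class shifts directly: class-1 candidate first, then class-2."""
--     out = []
--     p1 = (ci - a1) % 26
--     if p1 < 13:
--         out.append(chr(base + p1))
--     p2 = (ci - a2) % 26
--     if p2 >= 13:
--         out.append(chr(base + p2))
--     return out
--
-- def brute_force_decrypt(enc_text, shift1, shift2):
--     s1 = shift1 % 26
--     s2 = shift2 % 26
--     decrypted = []
--     ambiguities = []
--     for i, c in enumerate(enc_text):
--         if 'a' <= c <= 'z':
--             cands = _candidates(ord(c) - 97, s1 * s2, -(s1 + s2), 97)
--         elif 'A' <= c <= 'Z':
--             cands = _candidates(ord(c) - 65, -s1, s2 * s2, 65)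
--         else:
--             decrypted.append(c)
--             continue
--         if len(cands) == 1:
--             decrypted.append(cands[0])
--         else:
--             decrypted.append(cands[0] if cands else c)
--             ambiguities.append((i, c, cands))
--     return decrypted, ambiguities
-- ===== Notes on version B (the rewrite author's own statement) =====
-- stated objective: faster
-- what changed: Per letter, A trial-encrypts all 26 plaintext letters to find which map to the cipher char; B directly inverts the two class shifts with two modular computations, emitting the class-1 candidate before the class-2 one to match A's a..z scan order.
import Mathlib
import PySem

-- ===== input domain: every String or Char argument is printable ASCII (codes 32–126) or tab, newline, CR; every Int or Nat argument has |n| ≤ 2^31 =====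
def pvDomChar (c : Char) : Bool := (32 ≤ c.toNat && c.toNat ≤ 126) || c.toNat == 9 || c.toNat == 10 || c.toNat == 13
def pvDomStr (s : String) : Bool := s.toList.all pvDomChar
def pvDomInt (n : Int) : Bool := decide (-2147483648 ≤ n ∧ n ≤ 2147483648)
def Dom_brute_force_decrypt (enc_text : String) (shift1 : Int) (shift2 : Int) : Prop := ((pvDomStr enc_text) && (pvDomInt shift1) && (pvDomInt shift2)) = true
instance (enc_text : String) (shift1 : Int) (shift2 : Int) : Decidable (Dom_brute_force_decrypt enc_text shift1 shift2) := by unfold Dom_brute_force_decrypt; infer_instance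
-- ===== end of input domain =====

-- B replaces A's 26-iteration trial-encryption scan per letter by directly inverting the two
-- class shifts (one modular inverse per class), keeping the identical output; objective: faster
-- per-character work by a constant factor (26 trial encryptions → 2 arithmetic inversions).

-- ===== PORT A =====
def pvIsLower (c : Char) : Bool := 'a' ≤ c && c ≤ 'z'
def pvIsUpper (c : Char) : Bool := 'A' ≤ c && c ≤ 'Z'

def pvShiftChar (c : Char) (shift : Int) : Char :=
  if pvIsLower c then Char.ofNat ((PySem.Int.mod ((c.toNat : Int) - 97 + shift) 26).toNat + 97)
  else if pvIsUpper c then Char.ofNat ((PySem.Int.mod ((c.toNat : Int) - 65 + shift) 26).toNat + 65)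
  else c

def pvClassifyPlain (c : Char) : String :=
  if pvIsLower c then (if 'a' ≤ c && c ≤ 'm' then "L1" else "L2")
  else if pvIsUpper c then (if 'A' ≤ c && c ≤ 'M' then "U1" else "U2")
  else "O"

def pvLowerAlphabet : List Char := (PySem.List.pyRange 97 123 1).map (fun i => Char.ofNat i.toNat)
def pvUpperAlphabet : List Char := (PySem.List.pyRange 65 91 1).map (fun i => Char.ofNat i.toNat)

def pvCandsLower (c : Char) (s1 s2 : Int) : List String :=
  pvLowerAlphabet.foldl (fun acc p =>
    let code := pvClassifyPlain p
    let e := if code == "L1" then pvShiftChar p (PySem.Int.mod (s1 * s2) 26)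
             else pvShiftChar p (-(PySem.Int.mod (s1 + s2) 26))
    if e == c then acc ++ [String.ofList [p]] else acc) []

def pvCandsUpper (c : Char) (s1 s2 : Int) : List String :=
  pvUpperAlphabet.foldl (fun acc p =>
    let code := pvClassifyPlain p
    let e := if code == "U1" then pvShiftChar p (-s1)
             else pvShiftChar p (PySem.Int.mod (s2 * s2) 26)
    if e == c then acc ++ [String.ofList [p]] else acc) []

def pvFinishA (st : List String × List (Int × String × List String)) (i : Int) (c : Char)
    (cands : List String) : List String × List (Int × String × List String) :=
  if cands.length == 1 then (st.1 ++ [cands.headD (String.ofList [c])], st.2)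
  else (st.1 ++ [cands.headD (String.ofList [c])], st.2 ++ [(i, String.ofList [c], cands)])

def pvStepA (s1 s2 : Int) (st : List String × List (Int × String × List String))
    (ic : Int × Char) : List String × List (Int × String × List String) :=
  if pvIsLower ic.2 then pvFinishA st ic.1 ic.2 (pvCandsLower ic.2 s1 s2)
  else if pvIsUpper ic.2 then pvFinishA st ic.1 ic.2 (pvCandsUpper ic.2 s1 s2)
  else (st.1 ++ [String.ofList [ic.2]], st.2)

def brute_force_decrypt (enc_text : String) (shift1 : Int) (shift2 : Int) :
    List String × (List (Int × String × List String)) :=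
  (PySem.List.enumerate enc_text.toList 0).foldl
    (pvStepA (PySem.Int.mod shift1 26) (PySem.Int.mod shift2 26)) ([], [])

-- ===== PORT B =====
-- invert the two class shifts directly: class-1 candidate first, then class-2
def pvCandidatesB (ci a1 a2 base : Int) : List String :=
  let p1 := PySem.Int.mod (ci - a1) 26
  let out : List String := if p1 < 13 then [String.ofList [Char.ofNat (base + p1).toNat]] else []
  let p2 := PySem.Int.mod (ci - a2) 26
  if 13 ≤ p2 then out ++ [String.ofList [Char.ofNat (base + p2).toNat]] else out

def pvFinishB (st : List String × List (Int × String × List String)) (i : Int) (c : Char)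
    (cands : List String) : List String × List (Int × String × List String) :=
  if cands.length == 1 then (st.1 ++ [cands.headD (String.ofList [c])], st.2)
  else (st.1 ++ [cands.headD (String.ofList [c])], st.2 ++ [(i, String.ofList [c], cands)])

def pvStepB (s1 s2 : Int) (st : List String × List (Int × String × List String))
    (ic : Int × Char) : List String × List (Int × String × List String) :=
  if 'a' ≤ ic.2 && ic.2 ≤ 'z' then
    pvFinishB st ic.1 ic.2 (pvCandidatesB ((ic.2.toNat : Int) - 97) (s1 * s2) (-(s1 + s2)) 97)
  else if 'A' ≤ ic.2 && ic.2 ≤ 'Z' then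
    pvFinishB st ic.1 ic.2 (pvCandidatesB ((ic.2.toNat : Int) - 65) (-s1) (s2 * s2) 65)
  else (st.1 ++ [String.ofList [ic.2]], st.2)

def brute_force_decrypt_alt (enc_text : String) (shift1 : Int) (shift2 : Int) :
    List String × (List (Int × String × List String)) :=
  (PySem.List.enumerate enc_text.toList 0).foldl
    (pvStepB (PySem.Int.mod shift1 26) (PySem.Int.mod shift2 26)) ([], [])

-- ===== PRECONDITION & SPEC =====
def Spec_brute_force_decrypt (enc_text : String) (shift1 : Int) (shift2 : Int) (out : List String × (List (Int × String × List String))) : Prop := out = brute_force_decrypt_alt enc_text shift1 shift2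
instance (enc_text : String) (shift1 : Int) (shift2 : Int) (out : List String × (List (Int × String × List String))) : Decidable (Spec_brute_force_decrypt enc_text shift1 shift2 out) := by unfold Spec_brute_force_decrypt; infer_instance

-- ===== CLAIM (what is proved, stated in full; the proofs are below) =====
def Claim_equal_brute_force_decrypt : Prop := ∀ (enc_text : String) (shift1 : Int) (shift2 : Int), Dom_brute_force_decrypt enc_text shift1 shift2 → Spec_brute_force_decrypt enc_text shift1 shift2 (brute_force_decrypt enc_text shift1 shift2)

-- ===== LEMMAS AND PROOFS =====

-- the two class halves of each alphabet
def pvL1 : List Char := ['a','b','c','d','e','f','g','h','i','j','k','l','m']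
def pvL2 : List Char := ['n','o','p','q','r','s','t','u','v','w','x','y','z']
def pvU1 : List Char := ['A','B','C','D','E','F','G','H','I','J','K','L','M']
def pvU2 : List Char := ['N','O','P','Q','R','S','T','U','V','W','X','Y','Z']

lemma mod_sub_mod (x y : Int) :
    PySem.Int.mod (x - y) 26 = PySem.Int.mod (x - PySem.Int.mod y 26) 26 := by
  rw [PySem.Int.mod_eq_emod_of_pos (by omega), PySem.Int.mod_eq_emod_of_pos (by omega),
      PySem.Int.mod_eq_emod_of_pos (a := y) (by omega)]
  omega

-- A's lowercase inner loop in filter form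
lemma candsLower_filter (c : Char) (s1 s2 : Int) :
    pvCandsLower c s1 s2 =
      (pvL1.filter (fun p => pvShiftChar p (PySem.Int.mod (s1 * s2) 26) == c)).map
          (fun p => String.ofList [p])
      ++ (pvL2.filter (fun p => pvShiftChar p (-(PySem.Int.mod (s1 + s2) 26)) == c)).map
          (fun p => String.ofList [p]) := by
  rw [pvCandsLower, show pvLowerAlphabet = pvL1 ++ pvL2 from by decide, List.foldl_append]
  rw [PySem.List.foldl_congr_mem pvL2 _
        (fun acc p => if pvShiftChar p (-(PySem.Int.mod (s1 + s2) 26)) == c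
                      then acc ++ [String.ofList [p]] else acc) _
        (by intro acc p hp; fin_cases hp <;> rfl)]
  rw [PySem.List.foldl_congr_mem pvL1 _
        (fun acc p => if pvShiftChar p (PySem.Int.mod (s1 * s2) 26) == c
                      then acc ++ [String.ofList [p]] else acc) _
        (by intro acc p hp; fin_cases hp <;> rfl)]
  rw [PySem.List.foldl_append_if, PySem.List.foldl_append_if]
  simp

-- A's uppercase inner loop in filter form
lemma candsUpper_filter (c : Char) (s1 s2 : Int) :
    pvCandsUpper c s1 s2 =
      (pvU1.filter (fun p => pvShiftChar p (-s1) == c)).map (fun p => String.ofList [p])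
      ++ (pvU2.filter (fun p => pvShiftChar p (PySem.Int.mod (s2 * s2) 26) == c)).map
          (fun p => String.ofList [p]) := by
  rw [pvCandsUpper, show pvUpperAlphabet = pvU1 ++ pvU2 from by decide, List.foldl_append]
  rw [PySem.List.foldl_congr_mem pvU2 _
        (fun acc p => if pvShiftChar p (PySem.Int.mod (s2 * s2) 26) == c
                      then acc ++ [String.ofList [p]] else acc) _
        (by intro acc p hp; fin_cases hp <;> rfl)]
  rw [PySem.List.foldl_congr_mem pvU1 _
        (fun acc p => if pvShiftChar p (-s1) == c then acc ++ [String.ofList [p]] else acc) _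
        (by intro acc p hp; fin_cases hp <;> rfl)]
  rw [PySem.List.foldl_append_if, PySem.List.foldl_append_if]
  simp

-- B's candidate builder as an append of the two class results
lemma candidatesB_append (ci a1 a2 base : Int) :
    pvCandidatesB ci a1 a2 base =
      (if PySem.Int.mod (ci - a1) 26 < 13
       then [String.ofList [Char.ofNat (base + PySem.Int.mod (ci - a1) 26).toNat]] else [])
      ++ (if 13 ≤ PySem.Int.mod (ci - a2) 26
       then [String.ofList [Char.ofNat (base + PySem.Int.mod (ci - a2) 26).toNat]] else []) := by
  unfold pvCandidatesB
  dsimp only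
  split_ifs <;> simp

-- the four finite class lemmas (checked over all 26 × 26 cases)
set_option maxHeartbeats 4000000 in
lemma filterL1 : ∀ cf kf : Fin 26,
    (pvL1.filter (fun p => pvShiftChar p (kf.val : Int) == Char.ofNat (97 + cf.val))).map
        (fun p => String.ofList [p])
    = (if PySem.Int.mod ((cf.val : Int) - (kf.val : Int)) 26 < 13
       then [String.ofList [Char.ofNat
              ((97 : Int) + PySem.Int.mod ((cf.val : Int) - (kf.val : Int)) 26).toNat]]
       else []) := by decide

set_option maxHeartbeats 4000000 in
lemma filterL2 : ∀ cf kf : Fin 26,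
    (pvL2.filter (fun p => pvShiftChar p (-(kf.val : Int)) == Char.ofNat (97 + cf.val))).map
        (fun p => String.ofList [p])
    = (if 13 ≤ PySem.Int.mod ((cf.val : Int) + (kf.val : Int)) 26
       then [String.ofList [Char.ofNat
              ((97 : Int) + PySem.Int.mod ((cf.val : Int) + (kf.val : Int)) 26).toNat]]
       else []) := by decide

set_option maxHeartbeats 4000000 in
lemma filterU1 : ∀ cf sf : Fin 26,
    (pvU1.filter (fun p => pvShiftChar p (-(sf.val : Int)) == Char.ofNat (65 + cf.val))).map
        (fun p => String.ofList [p])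
    = (if PySem.Int.mod ((cf.val : Int) + (sf.val : Int)) 26 < 13
       then [String.ofList [Char.ofNat
              ((65 : Int) + PySem.Int.mod ((cf.val : Int) + (sf.val : Int)) 26).toNat]]
       else []) := by decide

set_option maxHeartbeats 4000000 in
lemma filterU2 : ∀ cf kf : Fin 26,
    (pvU2.filter (fun p => pvShiftChar p (kf.val : Int) == Char.ofNat (65 + cf.val))).map
        (fun p => String.ofList [p])
    = (if 13 ≤ PySem.Int.mod ((cf.val : Int) - (kf.val : Int)) 26
       then [String.ofList [Char.ofNat
              ((65 : Int) + PySem.Int.mod ((cf.val : Int) - (kf.val : Int)) 26).toNat]]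
       else []) := by decide

lemma mod_add_mod' (x y : Int) :
    PySem.Int.mod (x + y) 26 = PySem.Int.mod (x + PySem.Int.mod y 26) 26 := by
  rw [PySem.Int.mod_eq_emod_of_pos (by omega), PySem.Int.mod_eq_emod_of_pos (by omega),
      PySem.Int.mod_eq_emod_of_pos (a := y) (by omega)]
  omega

lemma toNat_ofNat_lower : ∀ cf : Fin 26, (Char.ofNat (97 + cf.val)).toNat = 97 + cf.val := by
  decide

lemma toNat_ofNat_upper : ∀ cf : Fin 26, (Char.ofNat (65 + cf.val)).toNat = 65 + cf.val := by
  decide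

lemma char_of_bounds {c : Char} {b : Nat}
    (h1 : b ≤ c.toNat) (h2 : c.toNat ≤ b + 25) :
    ∃ cf : Fin 26, c = Char.ofNat (b + cf.val) := by
  refine ⟨⟨c.toNat - b, by omega⟩, ?_⟩
  have h : b + (c.toNat - b) = c.toNat := by omega
  rw [h, Char.ofNat_toNat]

lemma lower_bounds {c : Char} (h : ('a' ≤ c && c ≤ 'z') = true) :
    97 ≤ c.toNat ∧ c.toNat ≤ 122 := by
  simp only [Bool.and_eq_true, decide_eq_true_eq, Char.le_def, UInt32.le_iff_toNat_le] at h
  exact h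

lemma upper_bounds {c : Char} (h : ('A' ≤ c && c ≤ 'Z') = true) :
    65 ≤ c.toNat ∧ c.toNat ≤ 90 := by
  simp only [Bool.and_eq_true, decide_eq_true_eq, Char.le_def, UInt32.le_iff_toNat_le] at h
  exact h

lemma candsLower_eq (c : Char) (s1 s2 : Int) (hc : ('a' ≤ c && c ≤ 'z') = true) :
    pvCandsLower c s1 s2 = pvCandidatesB ((c.toNat : Int) - 97) (s1 * s2) (-(s1 + s2)) 97 := by
  obtain ⟨hb1, hb2⟩ := lower_bounds hc
  obtain ⟨cf, rfl⟩ := char_of_bounds (b := 97) hb1 hb2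
  have hm1 : (0:Int) < 26 := by omega
  have hk1n := PySem.Int.mod_nonneg (s1 * s2) hm1
  have hk1l := PySem.Int.mod_lt (s1 * s2) hm1
  have hk2n := PySem.Int.mod_nonneg (s1 + s2) hm1
  have hk2l := PySem.Int.mod_lt (s1 + s2) hm1
  have hk1 : (((⟨(PySem.Int.mod (s1 * s2) 26).toNat, by omega⟩ : Fin 26)).val : Int)
      = PySem.Int.mod (s1 * s2) 26 := by simp; omega
  have hk2 : (((⟨(PySem.Int.mod (s1 + s2) 26).toNat, by omega⟩ : Fin 26)).val : Int)
      = PySem.Int.mod (s1 + s2) 26 := by simp; omega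
  have hci : ((Char.ofNat (97 + cf.val)).toNat : Int) - 97 = (cf.val : Int) := by
    rw [toNat_ofNat_lower]; push_cast; ring
  rw [candsLower_filter, candidatesB_append, hci, sub_neg_eq_add,
      mod_sub_mod ((cf.val : Int)) (s1 * s2), mod_add_mod' ((cf.val : Int)) (s1 + s2),
      ← hk1, ← hk2, filterL1, filterL2]

lemma candsUpper_eq (c : Char) (s1 s2 : Int) (hc : ('A' ≤ c && c ≤ 'Z') = true)
    (hs1 : 0 ≤ s1) (hs1' : s1 < 26) :
    pvCandsUpper c s1 s2 = pvCandidatesB ((c.toNat : Int) - 65) (-s1) (s2 * s2) 65 := by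
  obtain ⟨hb1, hb2⟩ := upper_bounds hc
  obtain ⟨cf, rfl⟩ := char_of_bounds (b := 65) hb1 hb2
  have hm1 : (0:Int) < 26 := by omega
  have hkn := PySem.Int.mod_nonneg (s2 * s2) hm1
  have hkl := PySem.Int.mod_lt (s2 * s2) hm1
  have hs : (((⟨s1.toNat, by omega⟩ : Fin 26)).val : Int) = s1 := by simp; omega
  have hk : (((⟨(PySem.Int.mod (s2 * s2) 26).toNat, by omega⟩ : Fin 26)).val : Int)
      = PySem.Int.mod (s2 * s2) 26 := by simp; omega
  have hci : ((Char.ofNat (65 + cf.val)).toNat : Int) - 65 = (cf.val : Int) := by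
    rw [toNat_ofNat_upper]; push_cast; ring
  rw [candsUpper_filter, candidatesB_append, hci, sub_neg_eq_add,
      mod_sub_mod ((cf.val : Int)) (s2 * s2), ← hs, ← hk, filterU1, filterU2]

lemma step_eq (s1 s2 : Int) (hs1 : 0 ≤ s1) (hs1' : s1 < 26) :
    pvStepA s1 s2 = pvStepB s1 s2 := by
  funext st ic
  unfold pvStepA pvStepB pvIsLower pvIsUpper pvFinishA pvFinishB
  by_cases hl : ('a' ≤ ic.2 && ic.2 ≤ 'z') = true
  · simp only [hl, if_true]
    rw [candsLower_eq _ _ _ hl]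
  · by_cases hu : ('A' ≤ ic.2 && ic.2 ≤ 'Z') = true
    · simp only [hl, hu, if_true, if_false, Bool.false_eq_true]
      rw [candsUpper_eq _ _ _ hu hs1 hs1']
    · simp only [hl, hu, if_false, Bool.false_eq_true]

-- ===== VERDICT (by name: the statement is the Claim_ definition above) =====
theorem brute_force_decrypt_spec : Claim_equal_brute_force_decrypt := by
  intro enc_text shift1 shift2 _
  unfold Spec_brute_force_decrypt brute_force_decrypt brute_force_decrypt_alt
  rw [step_eq _ _ (PySem.Int.mod_nonneg shift1 (by omega)) (PySem.Int.mod_lt shift1 (by omega))]
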